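-- pv_equiv track=rewrite | github.com/bobreddy2009/111 | PythonConcepts/decode_string.py | decode_the_string
-- ===== SOURCE A (Python) =====
-- def decode_the_string(coded_string,vowels):
--     output = ""
--     value = 0
--     for i in coded_string:
--         if i == "?":
--             output += vowels[value]
--             value+=1
--         else:
--             output+=i
--
--     return output
-- ===== SOURCE B (Python) =====
-- def decode_the_string(coded_string, vowels):
--     # find-and-slice: jump from '?' to '?', collect segments and vowels, join once
--     parts = []
--     rest = coded_string
--     k = 0
--     while True:
--         i = rest.find("?")
--         if i == -1:
--             parts.append(rest)
--             return "".join(parts)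
--         parts.append(rest[:i])
--         parts.append(vowels[k])
--         k += 1
--         rest = rest[i + 1:]
-- ===== Notes on version B (the rewrite author's own statement) =====
-- stated objective: alternative
-- what changed: B replaces A's char-by-char loop with a running output string and counter by a find-and-slice loop that jumps directly from one '?' to the next, collecting the untouched segments and the vowels in a list joined once at the end.
import Mathlib
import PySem

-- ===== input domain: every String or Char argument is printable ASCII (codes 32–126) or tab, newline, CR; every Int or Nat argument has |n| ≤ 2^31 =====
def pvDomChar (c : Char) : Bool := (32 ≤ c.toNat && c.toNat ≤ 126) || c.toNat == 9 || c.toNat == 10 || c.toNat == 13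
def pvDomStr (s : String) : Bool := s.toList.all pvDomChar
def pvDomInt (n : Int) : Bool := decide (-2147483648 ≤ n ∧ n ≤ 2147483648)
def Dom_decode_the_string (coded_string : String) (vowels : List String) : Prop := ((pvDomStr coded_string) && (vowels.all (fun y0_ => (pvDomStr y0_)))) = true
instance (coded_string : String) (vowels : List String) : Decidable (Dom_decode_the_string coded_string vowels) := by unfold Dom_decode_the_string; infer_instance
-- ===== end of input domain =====

-- B replaces A's char-by-char loop (running output string + vowel counter) by a find-and-slice
-- loop that jumps from one '?' to the next, joining the collected pieces once at the end.

-- ===== PORT A =====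
-- for i in coded_string: if i == "?": output += vowels[value]; value += 1 else: output += i
-- vowels[value] is PySem.List.pyGet?; Pre_ below excludes exactly the inputs where it is none (IndexError).
def decode_the_string (coded_string : String) (vowels : List String) : String :=
  let r := coded_string.toList.foldl
    (fun (st : List Char × Int) i =>
      if i = '?' then (st.1 ++ ((PySem.List.pyGet? vowels st.2).getD "").toList, st.2 + 1)
      else (st.1 ++ [i], st.2)) ([], 0)
  String.mk r.1

-- ===== PORT B =====
-- the while-True loop of Source B: i = rest.find("?"); stop on -1, else emit rest[:i] and vowels[k]
-- and continue on rest[i+1:]; vowels[k] via pyGet? (Pre_ excludes the IndexError inputs).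
def decodeGo (rest : List Char) (vowels : List String) (k : Nat) (parts : List (List Char)) : List Char :=
  let i := PySem.Chars.find rest ['?']
  if h : i = -1 then PySem.Chars.join [] (parts ++ [rest])
  else decodeGo (PySem.List.slice rest (some (i + 1)) none) vowels (k + 1)
    (parts ++ [PySem.List.slice rest none (some i), ((PySem.List.pyGet? vowels (k : Int)).getD "").toList])
termination_by rest.length
decreasing_by
  have hinf : ['?'] <:+: rest := (PySem.Chars.find_ne_neg_one_iff rest ['?']).1 h
  have h0 : 0 ≤ PySem.Chars.find rest ['?'] := (PySem.Chars.find_nonneg_iff rest ['?']).2 hinf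
  have hne : rest ≠ [] := by
    intro hr; subst hr
    exact (List.cons_ne_nil _ _) (List.eq_nil_of_infix_nil hinf)
  rw [PySem.List.slice_from _ (by omega)]
  have hpos : 0 < rest.length := List.length_pos_iff.2 hne
  have h1 : 1 ≤ (PySem.Chars.find rest ['?'] + 1).toNat := by omega
  simp only [List.length_drop]
  omega

def decode_the_string_alt (coded_string : String) (vowels : List String) : String :=
  String.mk (decodeGo coded_string.toList vowels 0 [])

-- ===== PRECONDITION & SPEC =====
-- Pre_ excludes exactly the inputs on which the Python A raises IndexError:
-- more '?' characters than there are vowels.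
def Pre_decode_the_string (coded_string : String) (vowels : List String) : Prop :=
  coded_string.toList.count '?' ≤ vowels.length
instance (coded_string : String) (vowels : List String) : Decidable (Pre_decode_the_string coded_string vowels) := by unfold Pre_decode_the_string; infer_instance
def pvWitness_decode_the_string : String × List String := ("h?ll? w?rld", ["e", "o", "o"])

def Spec_decode_the_string (coded_string : String) (vowels : List String) (out : String) : Prop := out = decode_the_string_alt coded_string vowels
instance (coded_string : String) (vowels : List String) (out : String) : Decidable (Spec_decode_the_string coded_string vowels out) := by unfold Spec_decode_the_string; infer_instance

-- ===== CLAIM (what is proved, stated in full; the proofs are below) =====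
def Claim_equal_decode_the_string : Prop := ∀ (coded_string : String) (vowels : List String), Dom_decode_the_string coded_string vowels → Pre_decode_the_string coded_string vowels → Spec_decode_the_string coded_string vowels (decode_the_string coded_string vowels)

-- ===== LEMMAS AND PROOFS =====

-- canonical recursion both ports are reduced to
def gSpec (cs : List Char) (vowels : List String) (k : Nat) : List Char :=
  match cs with
  | [] => []
  | c :: t =>
    if c = '?' then ((PySem.List.pyGet? vowels (k : Int)).getD "").toList ++ gSpec t vowels (k + 1)
    else c :: gSpec t vowels k

theorem foldA_eq_gSpec (vowels : List String) (cs : List Char) :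
    ∀ (out : List Char) (k : Nat),
      (cs.foldl (fun (st : List Char × Int) i =>
          if i = '?' then (st.1 ++ ((PySem.List.pyGet? vowels st.2).getD "").toList, st.2 + 1)
          else (st.1 ++ [i], st.2)) (out, (k : Int))).1
        = out ++ gSpec cs vowels k := by
  induction cs with
  | nil => intro out k; simp [gSpec]
  | cons c t ih =>
    intro out k
    by_cases hc : c = '?'
    · subst hc
      simp only [List.foldl_cons, gSpec, ite_true]
      have hcast : ((k : Int) + 1) = ((k + 1 : Nat) : Int) := by push_cast; ring
      rw [hcast, ih]
      simp
    · simp only [List.foldl_cons, if_neg hc, gSpec, ih]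
      simp

theorem gSpec_no_q (cs : List Char) (vowels : List String) (k : Nat)
    (h : '?' ∉ cs) : gSpec cs vowels k = cs := by
  induction cs with
  | nil => rfl
  | cons c t ih =>
    have hc : c ≠ '?' := by intro hc; exact h (hc ▸ List.mem_cons_self)
    simp only [gSpec, if_neg hc]
    rw [ih (fun hm => h (List.mem_cons_of_mem _ hm))]

theorem gSpec_append_no_q (a : List Char) (r : List Char) (vowels : List String) (k : Nat)
    (h : '?' ∉ a) : gSpec (a ++ r) vowels k = a ++ gSpec r vowels k := by
  induction a with
  | nil => rfl
  | cons c t ih =>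
    have hc : c ≠ '?' := by intro hc; exact h (hc ▸ List.mem_cons_self)
    simp only [List.cons_append, gSpec, if_neg hc]
    rw [ih (fun hm => h (List.mem_cons_of_mem _ hm))]

theorem joinNil_append_singleton (parts : List (List Char)) (x : List Char) :
    PySem.Chars.join [] (parts ++ [x]) = PySem.Chars.join [] parts ++ x := by
  induction parts with
  | nil => simp [PySem.Chars.join_singleton, PySem.Chars.join_nil]
  | cons a t ih =>
    cases t with
    | nil => simp [PySem.Chars.join_singleton, PySem.Chars.join_cons_cons]
    | cons b u =>
      simp only [List.cons_append] at ih ⊢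
      rw [PySem.Chars.join_cons_cons, PySem.Chars.join_cons_cons, ih]
      simp

theorem mem_imp_singleton_prefix_drop (cs : List Char) (j : Nat) (hj : j < cs.length)
    (h : cs[j] = '?') : ['?'] <+: cs.drop j := by
  rw [List.drop_eq_getElem_cons hj, h]
  exact ⟨cs.drop (j + 1), rfl⟩

theorem decodeGo_eq_gSpec (vowels : List String) (n : Nat) :
    ∀ (rest : List Char), rest.length ≤ n → ∀ (k : Nat) (parts : List (List Char)),
      decodeGo rest vowels k parts = PySem.Chars.join [] parts ++ gSpec rest vowels k := by
  induction n with
  | zero =>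
    intro rest hlen k parts
    have hr : rest = [] := List.eq_nil_of_length_eq_zero (Nat.le_zero.1 hlen)
    subst hr
    rw [decodeGo]
    have hfind : PySem.Chars.find [] ['?'] = (-1 : Int) := by decide
    simp only [hfind]
    rw [dif_pos trivial, joinNil_append_singleton]
    simp [gSpec]
  | succ n ih =>
    intro rest hlen k parts
    rw [decodeGo]
    by_cases h : PySem.Chars.find rest ['?'] = -1
    · simp only [h]
      rw [dif_pos trivial, joinNil_append_singleton]
      have hnin : '?' ∉ rest := by
        intro hm
        obtain ⟨s, t, rfl⟩ := List.append_of_mem hm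
        exact absurd ⟨s, t, by simp⟩ ((PySem.Chars.find_eq_neg_one_iff _ _).1 h)
      rw [gSpec_no_q _ _ _ hnin]
    · rw [dif_neg h]
      have h0 : 0 ≤ PySem.Chars.find rest ['?'] :=
        (PySem.Chars.find_nonneg_iff rest ['?']).2 ((PySem.Chars.find_ne_neg_one_iff rest ['?']).1 h)
      have hff : PySem.Chars.findFrom rest ['?'] ((0 : Nat) : Int) = PySem.Chars.find rest ['?'] := by
        norm_num [PySem.Chars.findFrom_zero]
      have spec := PySem.Chars.findFrom_natCast_spec rest ['?'] 0 (Nat.zero_le _) (by rw [hff]; exact h)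
      rw [hff] at spec
      obtain ⟨-, hpre, hmin⟩ := spec
      set i := PySem.Chars.find rest ['?'] with hi
      have hlt : i.toNat < rest.length := by
        rcases hpre with ⟨t, ht⟩
        have hlelen := congrArg List.length ht
        simp only [List.length_append, List.length_cons, List.length_nil, List.length_drop] at hlelen
        omega
      have hdropc : rest.drop i.toNat = rest[i.toNat]'hlt :: rest.drop (i.toNat + 1) :=
        List.drop_eq_getElem_cons hlt
      have hgetq : rest[i.toNat]'hlt = '?' := by
        rcases hpre with ⟨t, ht⟩
        rw [hdropc] at ht
        simp only [List.singleton_append] at ht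
        exact (List.cons_eq_cons.mp ht).1.symm
      have hdecomp : rest = rest.take i.toNat ++ '?' :: rest.drop (i.toNat + 1) := by
        conv_lhs => rw [← List.take_append_drop i.toNat rest]
        rw [hdropc, hgetq]
      have hnin : '?' ∉ rest.take i.toNat := by
        intro hm
        obtain ⟨j, hj, hget⟩ := List.getElem_of_mem hm
        have hjlt : j < i.toNat := by
          have := hj; simp only [List.length_take] at this; omega
        have hrj : rest[j]'(by omega) = '?' := by
          rw [← hget]; exact (List.getElem_take).symm
        exact hmin j (Nat.zero_le _) hjlt (mem_imp_singleton_prefix_drop rest j (by omega) hrj)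
      rw [PySem.List.slice_to rest h0, PySem.List.slice_from rest (by omega)]
      have htn : (i + 1).toNat = i.toNat + 1 := by omega
      rw [htn]
      have hlen2 : (rest.drop (i.toNat + 1)).length ≤ n := by
        simp only [List.length_drop]; omega
      rw [ih _ hlen2 (k + 1) _]
      rw [show parts ++ [rest.take i.toNat, ((PySem.List.pyGet? vowels (k : Int)).getD "").toList]
            = (parts ++ [rest.take i.toNat]) ++ [((PySem.List.pyGet? vowels (k : Int)).getD "").toList] by simp]
      rw [joinNil_append_singleton, joinNil_append_singleton]
      conv_rhs => rw [hdecomp]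
      rw [gSpec_append_no_q _ _ _ _ hnin]
      simp [gSpec]

-- ===== VERDICT (by name: the statement is the Claim_ definition above) =====
theorem decode_the_string_spec : Claim_equal_decode_the_string := by
  intro cs vs _ _
  unfold Spec_decode_the_string decode_the_string decode_the_string_alt
  rw [decodeGo_eq_gSpec vs cs.toList.length cs.toList (le_refl _) 0 []]
  rw [PySem.Chars.join_nil]
  simp only [List.nil_append]
  rw [show ((0 : Int)) = ((0 : Nat) : Int) from rfl, foldA_eq_gSpec]
  simp
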